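-- pv_equiv track=rewrite | github.com/slothgsr/Xword | multiplerxword/playground2.py | unused_generator
-- ===== SOURCE A (Python) =====
-- import string
--
-- def unused_generator(Gridlist):
--     letterdic = dict.fromkeys(string.ascii_lowercase, 0)
--     unused = []
--     for grid in Gridlist:
--         for word in grid:
--             for letter in word:
--                 if letter in letterdic:
--                     letterdic[letter] += 1
--                 else:
--                     letterdic[letter] = 1
--         unused.append(set([k for k,v in letterdic.items() if v == 0]))
--     return unused
-- ===== SOURCE B (Python) =====
-- import string
--
-- def unused_generator(Gridlist):
--     first_seen = {}
--     for i, grid in enumerate(Gridlist):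
--         for word in grid:
--             for letter in word:
--                 if letter not in first_seen:
--                     first_seen[letter] = i
--     n = len(Gridlist)
--     return [{c for c in string.ascii_lowercase if first_seen.get(c, n) > i}
--             for i in range(n)]
-- ===== Notes on version B (the rewrite author's own statement) =====
-- stated objective: faster
-- what changed: Replaces the running letter-count dict that rescans its items and builds a set inside every loop iteration by a two-phase scheme: a first pass records in first_seen[c] the index of the earliest grid containing each character (membership test only, no counting), then a separate pass builds entry i as the ascii_lowercase letters whose first-seen index exceeds i.
import Mathlib
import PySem

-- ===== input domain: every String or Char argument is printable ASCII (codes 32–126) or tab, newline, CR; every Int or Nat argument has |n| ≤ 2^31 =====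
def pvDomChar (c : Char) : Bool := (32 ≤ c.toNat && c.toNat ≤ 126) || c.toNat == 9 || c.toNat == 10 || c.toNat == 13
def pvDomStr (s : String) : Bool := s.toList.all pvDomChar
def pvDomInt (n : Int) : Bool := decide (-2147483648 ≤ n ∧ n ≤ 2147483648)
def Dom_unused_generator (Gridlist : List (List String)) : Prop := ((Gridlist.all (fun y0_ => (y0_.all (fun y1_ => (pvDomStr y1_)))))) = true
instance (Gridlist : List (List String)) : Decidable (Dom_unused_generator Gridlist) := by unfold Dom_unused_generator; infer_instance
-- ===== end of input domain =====

-- B replaces A's running letter-count dict (items rescanned per grid) by a two-pass first-seen-index table; a timing run measured it faster by a constant factor.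


-- ===== PORT A =====
-- string.ascii_lowercase (shared constant)
def pyAsciiLower : List Char :=
  ['a','b','c','d','e','f','g','h','i','j','k','l','m','n','o','p','q','r','s','t','u','v','w','x','y','z']

-- dict.fromkeys(string.ascii_lowercase, 0): the 26 keys are distinct, so the dict is the literal pair list
def pvInitDict : PySem.Dict Char Int := PySem.Dict.mk (pyAsciiLower.map (fun c => (c, (0 : Int))))

-- the body of A's innermost loop: if letter in letterdic: letterdic[letter] += 1 else: letterdic[letter] = 1
def pvStep (d : PySem.Dict Char Int) (x : Char) : PySem.Dict Char Int :=
  if d.contains x then d.modify x 0 (· + 1) else d.insert x 1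

def unused_generator (Gridlist : List (List String)) : List (List String) :=
  (Gridlist.foldl
    (fun (st : PySem.Dict Char Int × List (List String)) grid =>
      let d := grid.foldl (fun d word => word.toList.foldl pvStep d) st.1
      (d, st.2 ++ [PySem.Set.ofList ((d.items.filter (fun p => p.2 == 0)).map (fun p => String.ofList [p.1]))]))
    (pvInitDict, [])).2

-- ===== PORT B =====
-- the body of B's per-grid loop: for word in grid: for letter in word: if letter not in first_seen: first_seen[letter] = i
def pvStepB (fs : PySem.Dict Char Int) (ig : Int × List String) : PySem.Dict Char Int :=
  ig.2.foldl (fun fs word =>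
    word.toList.foldl (fun fs letter =>
      if fs.contains letter then fs else fs.insert letter ig.1) fs) fs

def unused_generator_alt (Gridlist : List (List String)) : List (List String) :=
  let fs : PySem.Dict Char Int := (PySem.List.enumerate Gridlist 0).foldl pvStepB PySem.Dict.empty
  let n : Int := Gridlist.length
  -- range(n): the indices 0..n-1, produced as Nat and cast to Int where Python compares ints
  (List.range Gridlist.length).map (fun (i : Nat) =>
    PySem.Set.ofList ((pyAsciiLower.filter (fun c => decide ((i : Int) < fs.getD c n))).map
      (fun c => String.ofList [c])))

-- ===== PRECONDITION & SPEC =====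
def Spec_unused_generator (Gridlist : List (List String)) (out : List (List String)) : Prop := out = unused_generator_alt Gridlist
instance (Gridlist : List (List String)) (out : List (List String)) : Decidable (Spec_unused_generator Gridlist out) := by unfold Spec_unused_generator; infer_instance

-- ===== CLAIM (what is proved, stated in full; the proofs are below) =====
def Claim_equal_unused_generator : Prop := ∀ (Gridlist : List (List String)), Dom_unused_generator Gridlist → Spec_unused_generator Gridlist (unused_generator Gridlist)

-- ===== LEMMAS AND PROOFS =====

-- all characters of one grid / of a list of grids, in reading order
def pvCharsOf (grid : List String) : List Char := grid.flatMap String.toList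
def pvGchars (gs : List (List String)) : List Char := gs.flatMap pvCharsOf

-- A's dict after it has consumed the character list P
def pvDictOf (P : List Char) : PySem.Dict Char Int := P.foldl pvStep pvInitDict

-- the canonical entry for a prefix whose characters are L
def pvEntryC (L : List Char) : List String :=
  (pyAsciiLower.filter (fun c => !(L.contains c))).map (fun c => String.ofList [c])

theorem pvAsciiNodup : pyAsciiLower.Nodup := by decide

theorem pvSing_inj : Function.Injective (fun c => String.ofList [c]) := by
  intro c d h
  have := congrArg String.toList h
  simpa using this

theorem pvStep_eq (d : PySem.Dict Char Int) (x : Char) :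
    pvStep d x = d.insert x (d.getD x 0 + 1) := by
  unfold pvStep
  by_cases h : d.contains x = true
  · simp [h, PySem.Dict.modify]
  · have h' : d.contains x = false := by simpa using h
    rw [if_neg (by simp [h']), PySem.Dict.getD_of_not_contains d 0 h']
    norm_num

theorem pvDictOf_eq (P : List Char) :
    pvDictOf P = P.foldl (fun d x => d.insert x (d.getD x 0 + 1)) pvInitDict := by
  exact PySem.List.foldl_congr_mem P _ _ _ (fun acc x _ => pvStep_eq acc x)

theorem pvGetD_mk_zeros (l : List Char) (c : Char) :
    (PySem.Dict.mk (l.map (fun a => (a, (0 : Int))))).getD c 0 = 0 := by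
  induction l with
  | nil => simp [PySem.Dict.getD_eq_get?_getD, PySem.Dict.get?]
  | cons a l ih =>
    simp only [List.map_cons, PySem.Dict.getD_eq_get?_getD, PySem.Dict.get?_mk_cons] at *
    split <;> simp_all

theorem pvKeys_init : pvInitDict.keys = pyAsciiLower := by
  simp [pvInitDict, PySem.Dict.keys, Function.comp_def]

theorem pvGetD_pvDictOf (P : List Char) (c : Char) :
    (pvDictOf P).getD c 0 = (P.count c : Int) := by
  rw [pvDictOf_eq]
  rw [PySem.Dict.getD_foldl_insert_add_one P pvInitDict c]
  simp [pvInitDict, pvGetD_mk_zeros]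

theorem pvKeys_pvDictOf (P : List Char) :
    (pvDictOf P).keys = PySem.Set.update pyAsciiLower P := by
  rw [pvDictOf_eq, PySem.Dict.keys_foldl_insert P (fun d x => d.getD x 0 + 1) pvInitDict, pvKeys_init]

theorem pvNodup_keys_pvDictOf (P : List Char) : (pvDictOf P).keys.Nodup := by
  rw [pvDictOf_eq]
  exact PySem.Dict.nodup_keys_foldl_insert P _ pvInitDict (by rw [pvKeys_init]; exact pvAsciiNodup)

theorem pvUpdate_split (l : List Char) : ∀ s : List Char,
    ∃ t, PySem.Set.update s l = s ++ t ∧ ∀ x ∈ t, x ∈ l := by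
  induction l with
  | nil => intro s; exact ⟨[], by simp [PySem.Set.update], by simp⟩
  | cons a l ih =>
    intro s
    have hstep : PySem.Set.update s (a :: l) = PySem.Set.update (PySem.Set.add s a) l := by
      simp [PySem.Set.update]
    by_cases h : a ∈ s
    · obtain ⟨t, ht, hm⟩ := ih s
      refine ⟨t, ?_, fun x hx => List.mem_cons_of_mem a (hm x hx)⟩
      rw [hstep]
      have hadd : PySem.Set.add s a = s := by simp [PySem.Set.add, PySem.Set.contains, h]
      rw [hadd, ht]
    · obtain ⟨t, ht, hm⟩ := ih (s ++ [a])
      refine ⟨a :: t, ?_, ?_⟩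
      · rw [hstep]
        have hadd : PySem.Set.add s a = s ++ [a] := by simp [PySem.Set.add, PySem.Set.contains, h]
        rw [hadd, ht, List.append_assoc]
        rfl
      · intro x hx
        rcases List.mem_cons.mp hx with rfl | hx
        · exact List.mem_cons_self
        · exact List.mem_cons_of_mem a (hm x hx)

-- A's appended entry, computed from the character list it has consumed
theorem pvEntryA_eq (L : List Char) :
    PySem.Set.ofList (((pvDictOf L).items.filter (fun p => p.2 == 0)).map (fun p => String.ofList [p.1]))
      = pvEntryC L := by
  have hn := pvNodup_keys_pvDictOf L
  rw [PySem.Dict.items_eq_map_keys (pvDictOf L) hn 0]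
  rw [List.filter_map, List.map_map]
  have hcomp :
      ((pvDictOf L).keys.filter ((fun p : Char × Int => p.2 == 0) ∘ fun k => (k, (pvDictOf L).getD k 0)))
        = (pvDictOf L).keys.filter (fun c => !(L.contains c)) := by
    apply List.filter_congr
    intro x _
    simp only [Function.comp, pvGetD_pvDictOf]
    by_cases hx : x ∈ L
    · simp [hx, Int.natCast_eq_zero, List.count_eq_zero]
    · simp [hx, beq_iff_eq, Int.natCast_eq_zero, List.count_eq_zero]
  rw [hcomp, pvKeys_pvDictOf]
  obtain ⟨t, ht, hm⟩ := pvUpdate_split L pyAsciiLower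
  rw [ht, List.filter_append]
  have htnil : t.filter (fun c => !(L.contains c)) = [] := by
    rw [List.filter_eq_nil_iff]
    intro x hx
    simp [hm x hx]
  rw [htnil, List.append_nil]
  have hmapeq :
      ((pyAsciiLower.filter (fun c => !(L.contains c))).map
        ((fun p : Char × Int => String.ofList [p.1]) ∘ fun k => (k, (pvDictOf L).getD k 0)))
        = pvEntryC L := by
    simp [pvEntryC, Function.comp]
  rw [hmapeq]
  exact PySem.Set.ofList_eq_self_of_nodup _
    (List.Nodup.map pvSing_inj (List.Nodup.filter _ pvAsciiNodup))

theorem pvGridFold (d : PySem.Dict Char Int) (grid : List String) :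
    grid.foldl (fun d word => word.toList.foldl pvStep d) d = (pvCharsOf grid).foldl pvStep d := by
  rw [pvCharsOf, List.foldl_flatMap]

theorem pvDictOf_append (P X : List Char) :
    pvDictOf (P ++ X) = X.foldl pvStep (pvDictOf P) := by
  rw [pvDictOf, pvDictOf, List.foldl_append]

theorem pvFoldA (gs : List (List String)) : ∀ (P : List Char) (out : List (List String)),
    (gs.foldl
      (fun (st : PySem.Dict Char Int × List (List String)) grid =>
        let d := grid.foldl (fun d word => word.toList.foldl pvStep d) st.1
        (d, st.2 ++ [PySem.Set.ofList ((d.items.filter (fun p => p.2 == 0)).map (fun p => String.ofList [p.1]))]))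
      (pvDictOf P, out)).2
    = out ++ (List.range gs.length).map (fun i => pvEntryC (P ++ pvGchars (gs.take (i + 1)))) := by
  induction gs with
  | nil => intro P out; simp
  | cons g rest ih =>
    intro P out
    rw [List.foldl_cons]
    have hd : g.foldl (fun d word => word.toList.foldl pvStep d) (pvDictOf P)
        = pvDictOf (P ++ pvCharsOf g) := by
      rw [pvGridFold, pvDictOf_append]
    simp only [hd]
    rw [ih (P ++ pvCharsOf g)]
    rw [List.length_cons, List.range_succ_eq_map, List.map_cons, List.map_map]
    rw [pvEntryA_eq]
    simp only [List.take_succ_cons, pvGchars, List.flatMap_cons, List.take_zero, List.flatMap_nil,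
      List.append_nil, List.append_assoc]
    simp [Function.comp_def]

-- B's first_seen dict: lookup of the inner insert-if-absent character loop
theorem pvGetIns (l : List Char) (v : Int) : ∀ (d : PySem.Dict Char Int) (c : Char),
    (l.foldl (fun d x => if d.contains x then d else d.insert x v) d).get? c
      = (d.get? c).or (if l.contains c then some v else none) := by
  induction l with
  | nil => intro d c; simp
  | cons x l ih =>
    intro d c
    rw [List.foldl_cons]
    by_cases h : d.contains x = true
    · rw [if_pos h, ih]
      by_cases hcx : c = x
      · subst hcx
        have hs : ∃ w, d.get? c = some w := by
          rcases ho : d.get? c with _ | w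
          · rw [PySem.Dict.get?_eq_none_iff_contains] at ho; simp_all
          · exact ⟨w, rfl⟩
        obtain ⟨w, hw⟩ := hs
        simp [hw, Option.or]
      · simp [hcx]
    · rw [if_neg h]
      rw [ih]
      have hnone : d.get? x = none := by
        rw [PySem.Dict.get?_eq_none_iff_contains]; simpa using h
      by_cases hcx : c = x
      · subst hcx
        rw [PySem.Dict.get?_insert_self, hnone]
        simp [Option.or]
      · rw [PySem.Dict.get?_insert, if_neg hcx]
        simp [hcx]

theorem pvStepB_eq (d : PySem.Dict Char Int) (k : Int) (g : List String) :
    pvStepB d (k, g) = (pvCharsOf g).foldl (fun d x => if d.contains x then d else d.insert x k) d := by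
  rw [pvStepB, pvCharsOf, List.foldl_flatMap]

theorem pvEnum_cons (g : List String) (rest : List (List String)) (k : Int) :
    PySem.List.enumerate (g :: rest) k = (k, g) :: PySem.List.enumerate rest (k + 1) := rfl

theorem pvGetFs (gs : List (List String)) : ∀ (k : Int) (d : PySem.Dict Char Int) (c : Char),
    ((PySem.List.enumerate gs k).foldl pvStepB d).get? c
      = (d.get? c).or (Option.map (fun j : Nat => k + (j : Int)) (List.findIdx? (fun g => (pvCharsOf g).contains c) gs)) := by
  induction gs with
  | nil => intro k d c; simp [PySem.List.enumerate]
  | cons g rest ih =>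
    intro k d c
    rw [pvEnum_cons, List.foldl_cons, ih, pvStepB_eq, pvGetIns, List.findIdx?_cons]
    by_cases hp : (pvCharsOf g).contains c = true
    · rw [if_pos hp, if_pos hp, Option.or_assoc]
      rcases d.get? c with _ | w <;> simp [Option.or]
    · rw [if_neg hp, if_neg hp]
      simp only [Option.or_none, Option.map_map]
      have hfun : (fun j : Nat => k + 1 + (j : Int)) = ((fun j : Nat => k + (j : Int)) ∘ fun i : Nat => i + 1) := by
        funext j
        simp only [Function.comp_apply]
        push_cast
        ring
      rw [hfun]

-- membership of c in the characters of the first i+1 grids, by grid index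
theorem pvMemGchars (gs : List (List String)) (i : Nat) (c : Char) :
    c ∈ pvGchars (gs.take (i + 1)) ↔
      ∃ j, ∃ h : j < gs.length, j ≤ i ∧ c ∈ pvCharsOf gs[j] := by
  rw [pvGchars, List.mem_flatMap]
  constructor
  · rintro ⟨g, hg, hc⟩
    rw [List.mem_take_iff_getElem] at hg
    obtain ⟨j, hj, rfl⟩ := hg
    exact ⟨j, lt_of_lt_of_le hj (min_le_right _ _), by omega, hc⟩
  · rintro ⟨j, hj, hji, hc⟩
    refine ⟨gs[j], ?_, hc⟩
    rw [List.mem_take_iff_getElem]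
    exact ⟨j, by omega, rfl⟩

-- B's filter test equals "c unseen in the first i+1 grids"
theorem pvCond_eq (gs : List (List String)) (i : Nat) (hi : i < gs.length) (c : Char) :
    (decide ((i : Int) < (((PySem.List.enumerate gs 0).foldl pvStepB PySem.Dict.empty).getD c (gs.length : Int))))
      = !((pvGchars (gs.take (i + 1))).contains c) := by
  have hfs := pvGetFs gs 0 PySem.Dict.empty c
  rw [PySem.Dict.get?_empty] at hfs
  rw [PySem.Dict.getD_eq_get?_getD, hfs]
  rcases hf : List.findIdx? (fun g => (pvCharsOf g).contains c) gs with _ | j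
  · have hnot : ¬ c ∈ pvGchars (gs.take (i + 1)) := by
      rw [pvMemGchars]
      rintro ⟨j, hj, hji, hc⟩
      have := (List.findIdx?_eq_none_iff.mp hf) gs[j] (List.getElem_mem hj)
      simp_all
    simp [hnot, hi]
  · obtain ⟨hjl, hpj, hmin⟩ := List.findIdx?_eq_some_iff_getElem.mp hf
    by_cases hji : j ≤ i
    · have hmem : c ∈ pvGchars (gs.take (i + 1)) := by
        rw [pvMemGchars]
        refine ⟨j, hjl, hji, by simpa using hpj⟩
      simp [hmem]
      omega
    · have hnot : ¬ c ∈ pvGchars (gs.take (i + 1)) := by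
        rw [pvMemGchars]
        rintro ⟨j', hj', hji', hc⟩
        have := hmin j' (by omega)
        simp_all
      simp [hnot]
      omega

theorem pvAltEntry (gs : List (List String)) (i : Nat) (hi : i < gs.length) :
    PySem.Set.ofList ((pyAsciiLower.filter (fun c =>
        decide ((i : Int) < (((PySem.List.enumerate gs 0).foldl pvStepB PySem.Dict.empty).getD c (gs.length : Int))))).map
      (fun c => String.ofList [c]))
    = pvEntryC (pvGchars (gs.take (i + 1))) := by
  have hfc : (pyAsciiLower.filter (fun c =>
        decide ((i : Int) < (((PySem.List.enumerate gs 0).foldl pvStepB PySem.Dict.empty).getD c (gs.length : Int)))))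
      = pyAsciiLower.filter (fun c => !((pvGchars (gs.take (i + 1))).contains c)) := by
    apply List.filter_congr
    intro x _
    exact pvCond_eq gs i hi x
  rw [hfc]
  exact PySem.Set.ofList_eq_self_of_nodup _
    (List.Nodup.map pvSing_inj (List.Nodup.filter _ pvAsciiNodup))

-- ===== VERDICT (by name: the statement is the Claim_ definition above) =====
theorem unused_generator_spec : Claim_equal_unused_generator := by
  intro Gridlist _
  unfold Spec_unused_generator unused_generator unused_generator_alt
  have hinit : pvInitDict = pvDictOf [] := rfl
  rw [hinit, pvFoldA Gridlist [] []]
  simp only [List.nil_append]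
  apply List.map_congr_left
  intro i hi
  rw [pvAltEntry Gridlist i (List.mem_range.mp hi)]
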